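-- pv_equiv track=rewrite | github.com/AlexanderJulianKing/project-soothsayer | soothsayer_writing/super_bench.py | build_pair_orientation_map
-- ===== SOURCE A (Python) =====
-- from typing import Dict, List, Optional, Set, Tuple
--
-- def build_pair_orientation_map(existing_orientations: set, judge_name: str) -> Dict[Tuple[str, Tuple[str, str]], Set[Tuple[str, str]]]:
--     orientation_map: Dict[Tuple[str, Tuple[str, str]], Set[Tuple[str, str]]] = {}
--     for prompt_id, story_a, story_b, judge in existing_orientations:
--         if judge != judge_name:
--             continue
--         key = (prompt_id, tuple(sorted((story_a, story_b))))
--         orientation_map.setdefault(key, set()).add((story_a, story_b))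
--     return orientation_map
-- ===== SOURCE B (Python) =====
-- def build_pair_orientation_map(existing_orientations, judge_name):
--     def key_of(p, a, b):
--         return (p, (a, b) if a <= b else (b, a))
--     relevant = [(p, a, b) for (p, a, b, j) in existing_orientations if j == judge_name]
--     keys = []
--     for p, a, b in relevant:
--         k = key_of(p, a, b)
--         if k not in keys:
--             keys.append(k)
--     return {k: {(a, b) for (p, a, b) in relevant if key_of(p, a, b) == k}
--             for k in keys}
-- ===== Notes on version B (the rewrite author's own statement) =====
-- stated objective: alternative
-- what changed: Replaces A's single-pass incremental dict-of-sets accumulation (setdefault + in-place set.add) by a filter of the matching tuples, an explicit first-occurrence key list, and a per-key rescan of the filtered list building each value set at once.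
import Mathlib
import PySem

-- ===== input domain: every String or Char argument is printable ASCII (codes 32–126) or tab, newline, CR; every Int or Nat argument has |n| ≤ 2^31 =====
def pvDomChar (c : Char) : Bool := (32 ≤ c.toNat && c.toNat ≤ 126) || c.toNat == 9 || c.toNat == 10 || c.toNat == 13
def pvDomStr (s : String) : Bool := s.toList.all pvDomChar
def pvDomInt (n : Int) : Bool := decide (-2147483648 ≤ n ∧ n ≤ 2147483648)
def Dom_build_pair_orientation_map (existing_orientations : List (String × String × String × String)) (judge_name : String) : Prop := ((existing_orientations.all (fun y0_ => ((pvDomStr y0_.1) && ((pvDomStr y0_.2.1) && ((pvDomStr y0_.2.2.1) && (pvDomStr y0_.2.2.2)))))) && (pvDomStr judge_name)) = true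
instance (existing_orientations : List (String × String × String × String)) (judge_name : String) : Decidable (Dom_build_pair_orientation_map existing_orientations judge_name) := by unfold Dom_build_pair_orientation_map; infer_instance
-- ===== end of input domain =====

-- B replaces A's incremental dict-of-sets accumulation by a filter, an explicit first-occurrence
-- key list, and a per-key scan of the filtered list (objective: alternative decomposition).

-- ===== PORT A =====
-- A's dict is PySem.Dict keyed by (prompt_id, sorted pair); returned as its items list,
-- with the (key, value) pair flattened to the required triple shape.
-- tuple(sorted((a, b))) on two strings is exactly 'if a ≤ b then (a, b) else (b, a)'.
def build_pair_orientation_map (existing_orientations : List (String × String × String × String)) (judge_name : String) : List (String × (String × String) × List (String × String)) :=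
  ((existing_orientations.foldl
      (fun (d : PySem.Dict (String × String × String) (PySem.Set (String × String))) t =>
        if t.2.2.2 ≠ judge_name then d
        else
          let key : String × String × String :=
            (t.1, if t.2.1 ≤ t.2.2.1 then (t.2.1, t.2.2.1) else (t.2.2.1, t.2.1))
          d.insert key (PySem.Set.add (d.getD key PySem.Set.empty) (t.2.1, t.2.2.1)))
      PySem.Dict.empty).items).map (fun p => (p.1.1, p.1.2, p.2))

-- ===== PORT B =====
-- Source B's key_of(p, a, b)
def pvKeyOf (t : String × String × String) : String × String × String :=
  (t.1, if t.2.1 ≤ t.2.2 then (t.2.1, t.2.2) else (t.2.2, t.2.1))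

def build_pair_orientation_map_alt (existing_orientations : List (String × String × String × String)) (judge_name : String) : List (String × (String × String) × List (String × String)) :=
  let relevant : List (String × String × String) :=
    (existing_orientations.filter (fun t => t.2.2.2 == judge_name)).map
      (fun t => (t.1, t.2.1, t.2.2.1))
  let keys : List (String × String × String) :=
    relevant.foldl (fun ks t => if pvKeyOf t ∈ ks then ks else ks ++ [pvKeyOf t]) []
  keys.map (fun k =>
    (k.1, k.2,
      PySem.Set.ofList ((relevant.filter (fun t => pvKeyOf t == k)).map (fun t => t.2))))

-- ===== PRECONDITION & SPEC =====
def Spec_build_pair_orientation_map (existing_orientations : List (String × String × String × String)) (judge_name : String) (out : List (String × (String × String) × List (String × String))) : Prop := out = build_pair_orientation_map_alt existing_orientations judge_name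
instance (existing_orientations : List (String × String × String × String)) (judge_name : String) (out : List (String × (String × String) × List (String × String))) : Decidable (Spec_build_pair_orientation_map existing_orientations judge_name out) := by unfold Spec_build_pair_orientation_map; infer_instance

-- ===== CLAIM (what is proved, stated in full; the proofs are below) =====
def Claim_equal_build_pair_orientation_map : Prop := ∀ (existing_orientations : List (String × String × String × String)) (judge_name : String), Dom_build_pair_orientation_map existing_orientations judge_name → Spec_build_pair_orientation_map existing_orientations judge_name (build_pair_orientation_map existing_orientations judge_name)

-- ===== LEMMAS AND PROOFS =====

-- A's loop body on the filtered / projected triples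
def pvStep (d : PySem.Dict (String × String × String) (PySem.Set (String × String)))
    (t : String × String × String) : PySem.Dict (String × String × String) (PySem.Set (String × String)) :=
  d.insert (pvKeyOf t) (PySem.Set.add (d.getD (pvKeyOf t) PySem.Set.empty) t.2)

-- B's first-occurrence key list
def pvDKeys (l : List (String × String × String)) : List (String × String × String) :=
  l.foldl (fun ks t => if pvKeyOf t ∈ ks then ks else ks ++ [pvKeyOf t]) []

-- B's per-key value set
def pvSetFor (l : List (String × String × String)) (k : String × String × String) :
    PySem.Set (String × String) :=
  PySem.Set.ofList ((l.filter (fun t => pvKeyOf t == k)).map (fun t => t.2))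

lemma pvDKeys_eq_ofList (l : List (String × String × String)) :
    pvDKeys l = PySem.Set.ofList (l.map pvKeyOf) := by
  unfold pvDKeys
  rw [← PySem.Set.update_empty, PySem.Set.update_map_eq_foldl_add]
  simp [PySem.Set.add_eq_ite]

lemma pvDKeys_append (l : List (String × String × String)) (t : String × String × String) :
    pvDKeys (l ++ [t]) = if pvKeyOf t ∈ pvDKeys l then pvDKeys l else pvDKeys l ++ [pvKeyOf t] := by
  unfold pvDKeys; rw [List.foldl_append]; rfl

lemma pvSetFor_append (l : List (String × String × String)) (t k : String × String × String) :
    pvSetFor (l ++ [t]) k =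
      if pvKeyOf t = k then PySem.Set.add (pvSetFor l k) t.2 else pvSetFor l k := by
  unfold pvSetFor
  rw [List.filter_append]
  by_cases h : pvKeyOf t = k
  · simp [h, PySem.Set.ofList_append_singleton]
  · simp [h]

lemma pvSetFor_of_not_mem (l : List (String × String × String)) (k : String × String × String)
    (h : k ∉ pvDKeys l) : pvSetFor l k = [] := by
  unfold pvSetFor
  rw [pvDKeys_eq_ofList] at h
  have : l.filter (fun t => pvKeyOf t == k) = [] := by
    apply List.filter_eq_nil_iff.mpr
    intro t ht hbeq
    exact h ((PySem.Set.mem_ofList _ _).mpr (List.mem_map.mpr ⟨t, ht, (beq_iff_eq.mp hbeq).symm ▸ rfl⟩))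
  simp [this, PySem.Set.ofList]

-- the main invariant: the items of A's folded dict are B's keys paired with B's sets
lemma pvFold_items (l : List (String × String × String)) :
    (l.foldl pvStep PySem.Dict.empty).items
      = (pvDKeys l).map (fun k => (k, pvSetFor l k)) := by
  induction l using List.reverseRecOn with
  | nil => rfl
  | append_singleton l t ih =>
    have hkeys : (l.foldl pvStep PySem.Dict.empty).keys = pvDKeys l := by
      rw [PySem.Dict.keys, ih, List.map_map]; exact List.map_id' _
    have hnodup : (l.foldl pvStep PySem.Dict.empty).keys.Nodup := by
      rw [hkeys, pvDKeys_eq_ofList]; exact PySem.Set.nodup_ofList _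
    rw [List.foldl_append]
    simp only [List.foldl_cons, List.foldl_nil]
    rw [pvDKeys_append]
    by_cases h : pvKeyOf t ∈ pvDKeys l
    · -- key already present: insert overwrites in place
      have hmemit : (pvKeyOf t, pvSetFor l (pvKeyOf t)) ∈ (l.foldl pvStep PySem.Dict.empty).items := by
        rw [ih]; exact List.mem_map.mpr ⟨pvKeyOf t, h, rfl⟩
      have hcont : (l.foldl pvStep PySem.Dict.empty).contains (pvKeyOf t) = true := by
        rw [PySem.Dict.contains_iff_mem_keys, hkeys]; exact h
      have hgetD : (l.foldl pvStep PySem.Dict.empty).getD (pvKeyOf t) PySem.Set.empty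
          = pvSetFor l (pvKeyOf t) :=
        PySem.Dict.getD_of_mem_items _ hmemit hnodup _
      rw [pvStep, PySem.Dict.items_insert_of_contains _ _ hcont, hgetD, ih, List.map_map, if_pos h]
      apply List.map_congr_left
      intro k hk
      by_cases hkt : k = pvKeyOf t
      · subst hkt
        simp [pvSetFor_append, beq_iff_eq]
      · have h1 : (k == pvKeyOf t) = false := by simp [hkt]
        have h2 : ¬ pvKeyOf t = k := fun hh => hkt hh.symm
        simp [h2, hkt, pvSetFor_append]
    · -- new key: appended at the end with a fresh singleton set
      have hcont : (l.foldl pvStep PySem.Dict.empty).contains (pvKeyOf t) = false := by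
        rw [← Bool.not_eq_true, PySem.Dict.contains_iff_mem_keys, hkeys]; exact h
      have hgetD : (l.foldl pvStep PySem.Dict.empty).getD (pvKeyOf t) PySem.Set.empty
          = PySem.Set.empty :=
        PySem.Dict.getD_of_not_contains _ _ hcont
      rw [pvStep, PySem.Dict.items_insert_of_not_contains _ _ hcont, hgetD, ih, if_neg h, List.map_append]
      congr 1
      · apply List.map_congr_left
        intro k hk
        have hkt : ¬ pvKeyOf t = k := fun hh => h (hh ▸ hk)
        simp [pvSetFor_append, hkt]
      · simp [pvSetFor_append, pvSetFor_of_not_mem l _ h,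
              PySem.Set.add, PySem.Set.empty]

-- A's loop over the raw 4-tuples equals pvStep folded over the filtered, projected triples
lemma pvFold_filter (existing_orientations : List (String × String × String × String))
    (judge_name : String)
    (d : PySem.Dict (String × String × String) (PySem.Set (String × String))) :
    existing_orientations.foldl
      (fun d t =>
        if t.2.2.2 ≠ judge_name then d
        else
          let key : String × String × String :=
            (t.1, if t.2.1 ≤ t.2.2.1 then (t.2.1, t.2.2.1) else (t.2.2.1, t.2.1))
          d.insert key (PySem.Set.add (d.getD key PySem.Set.empty) (t.2.1, t.2.2.1))) d
    = ((existing_orientations.filter (fun t => t.2.2.2 == judge_name)).map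
        (fun t => (t.1, t.2.1, t.2.2.1))).foldl pvStep d := by
  induction existing_orientations generalizing d with
  | nil => rfl
  | cons t rest ih =>
    by_cases hj : t.2.2.2 = judge_name
    · simp only [List.foldl_cons, List.filter_cons, hj]
      rw [if_neg (by simp), ih]
      simp [pvStep, pvKeyOf]
    · simp only [List.foldl_cons, List.filter_cons]
      rw [if_pos (by simp [hj]), ih, show (t.2.2.2 == judge_name) = false by simp [hj]]
      simp

-- ===== VERDICT (by name: the statement is the Claim_ definition above) =====
theorem build_pair_orientation_map_spec : Claim_equal_build_pair_orientation_map := by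
  intro eo judge _
  show build_pair_orientation_map eo judge = build_pair_orientation_map_alt eo judge
  unfold build_pair_orientation_map build_pair_orientation_map_alt
  rw [pvFold_filter, pvFold_items, List.map_map]
  rfl
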